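-- pv_equiv track=rewrite | github.com/PhillHenry/ueba | ueba/parse/bashhistory.py | truncate_or_pad
-- ===== SOURCE A (Python) =====
-- def truncate_or_pad(vs, n):
--     sized = []
--     for v in vs:
--         length = len(v)
--         if length > n:
--             sized.append(v[:n])
--         else:
--             padding = [0] * (n - length)
--             v = v + padding
--             sized.append(v)
--     return sized
-- ===== SOURCE B (Python) =====
-- def truncate_or_pad(vs, n):
--     # Build each output row by position: index into v where it reaches, else 0.
--     return [[v[i] if i < len(v) else 0 for i in range(n)] for v in vs]
-- ===== Notes on version B (the rewrite author's own statement) =====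
-- stated objective: alternative
-- what changed: Instead of slicing/concatenating whole sublists, B constructs each output row element-by-element by position: for each index i in range(n) it reads v[i] when in range and 0 otherwise, so neither a truncating slice nor a padding list is ever built.
-- outside the precondition, e.g. on truncate_or_pad([[1, 2, 3]], -1): A returns [[1, 2]], B returns [[]]
import Mathlib
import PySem

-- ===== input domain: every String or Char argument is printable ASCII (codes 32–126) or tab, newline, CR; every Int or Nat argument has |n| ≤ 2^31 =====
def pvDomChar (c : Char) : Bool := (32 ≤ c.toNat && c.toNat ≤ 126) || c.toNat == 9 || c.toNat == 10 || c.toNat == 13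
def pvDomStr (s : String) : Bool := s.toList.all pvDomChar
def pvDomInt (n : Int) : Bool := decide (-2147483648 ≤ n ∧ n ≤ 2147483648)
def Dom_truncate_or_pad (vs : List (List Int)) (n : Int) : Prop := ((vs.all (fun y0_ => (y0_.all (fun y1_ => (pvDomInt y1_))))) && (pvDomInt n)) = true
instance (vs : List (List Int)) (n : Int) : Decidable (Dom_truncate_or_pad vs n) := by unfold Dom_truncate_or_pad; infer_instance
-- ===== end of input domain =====

-- B builds each row by position (v[i] if in range else 0) instead of slicing/padding whole lists; alternative decomposition, not faster.

-- ===== PORT A =====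
def truncate_or_pad (vs : List (List Int)) (n : Int) : List (List Int) :=
  vs.foldl (fun sized v =>
    let length : Int := v.length
    if length > n then
      sized ++ [PySem.List.slice v none (some n)]
    else
      sized ++ [v ++ List.replicate (n - length).toNat 0]) []

-- ===== PORT B =====
def truncate_or_pad_alt (vs : List (List Int)) (n : Int) : List (List Int) :=
  vs.map (fun v =>
    (PySem.List.pyRange 0 n 1).map (fun i =>
      if i < (v.length : Int) then PySem.List.pyGetD v i 0 else 0))

-- ===== PRECONDITION & SPEC =====
-- Pre_ excludes a degenerate corner: negative target length n with some row longer than -n,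
-- where A's value (v[:n], a tail-drop via Python's negative-slice rule) and B's (an empty row)
-- are both unspecified-corner behaviours of a pad-to-length function.
def Pre_truncate_or_pad (vs : List (List Int)) (n : Int) : Prop :=
  0 ≤ n ∨ ∀ v ∈ vs, (v.length : Int) ≤ -n
instance (vs : List (List Int)) (n : Int) : Decidable (Pre_truncate_or_pad vs n) := by unfold Pre_truncate_or_pad; infer_instance
def pvWitness_truncate_or_pad : List (List Int) × Int := ([[1, 2, 3], [4]], 2)

def Spec_truncate_or_pad (vs : List (List Int)) (n : Int) (out : List (List Int)) : Prop := out = truncate_or_pad_alt vs n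
instance (vs : List (List Int)) (n : Int) (out : List (List Int)) : Decidable (Spec_truncate_or_pad vs n out) := by unfold Spec_truncate_or_pad; infer_instance

-- ===== CLAIM (what is proved, stated in full; the proofs are below) =====
def Claim_equal_truncate_or_pad : Prop := ∀ (vs : List (List Int)) (n : Int), Dom_truncate_or_pad vs n → Pre_truncate_or_pad vs n → Spec_truncate_or_pad vs n (truncate_or_pad vs n)

-- ===== LEMMAS AND PROOFS =====

-- the two per-row bodies agree on a short row when n < 0
lemma row_eq_neg (v : List Int) (n : Int) (hn : n < 0) (hv : (v.length : Int) ≤ -n) :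
    (if (v.length : Int) > n then PySem.List.slice v none (some n)
     else v ++ List.replicate (n - (v.length : Int)).toNat 0)
    = (PySem.List.pyRange 0 n 1).map (fun i =>
        if i < (v.length : Int) then PySem.List.pyGetD v i 0 else 0) := by
  have h : (v.length : Int) > n := by omega
  have hk : 0 < (-n).toNat := by omega
  have hnk : n = -((-n).toNat : Int) := by omega
  rw [if_pos h, PySem.List.pyRange_one, hnk,
    PySem.List.slice_to_neg_natCast v ((-n).toNat) hk]
  have h1 : v.length - (-n).toNat = 0 := by omega
  simp [h1]

-- the two per-row bodies agree for n ≥ 0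
lemma row_eq (v : List Int) (n : Int) (hn : 0 ≤ n) :
    (if (v.length : Int) > n then PySem.List.slice v none (some n)
     else v ++ List.replicate (n - (v.length : Int)).toNat 0)
    = (PySem.List.pyRange 0 n 1).map (fun i =>
        if i < (v.length : Int) then PySem.List.pyGetD v i 0 else 0) := by
  rw [PySem.List.pyRange_one]
  apply List.ext_getElem
  · by_cases h : (v.length : Int) > n
    · simp [h, PySem.List.slice_to _ hn]; omega
    · simp [h]; omega
  · intro j h1 h2
    have hj : j < n.toNat := by simpa using h2
    by_cases h : (v.length : Int) > n
    · have hjv : j < v.length := by omega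
      simp [h, PySem.List.slice_to _ hn, hjv, PySem.List.pyGetD_natCast,
        List.getD_eq_getElem?_getD]
    · by_cases hjv : j < v.length
      · simp [h, hjv, List.getElem_append, PySem.List.pyGetD_natCast,
          List.getD_eq_getElem?_getD, List.getElem?_eq_getElem hjv]
      · have : ¬ ((j : Int) < (v.length : Int)) := by exact_mod_cast hjv
        simp [h, hjv, List.getElem_append, this]

lemma foldl_map_rows (vs : List (List Int)) (n : Int)
    (hrow : ∀ v ∈ vs,
      (if (v.length : Int) > n then PySem.List.slice v none (some n)
       else v ++ List.replicate (n - (v.length : Int)).toNat 0)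
      = (PySem.List.pyRange 0 n 1).map (fun i =>
          if i < (v.length : Int) then PySem.List.pyGetD v i 0 else 0))
    (acc : List (List Int)) :
    vs.foldl (fun sized v =>
      let length : Int := v.length
      if length > n then
        sized ++ [PySem.List.slice v none (some n)]
      else
        sized ++ [v ++ List.replicate (n - length).toNat 0]) acc
    = acc ++ vs.map (fun v =>
        (PySem.List.pyRange 0 n 1).map (fun i =>
          if i < (v.length : Int) then PySem.List.pyGetD v i 0 else 0)) := by
  induction vs generalizing acc with
  | nil => simp
  | cons v vs ih =>
    rw [List.foldl_cons]
    show List.foldl _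
        (if ((v.length : Int)) > n then acc ++ [PySem.List.slice v none (some n)]
         else acc ++ [v ++ List.replicate (n - (v.length : Int)).toNat 0]) vs = _
    have : (if ((v.length : Int)) > n then acc ++ [PySem.List.slice v none (some n)]
         else acc ++ [v ++ List.replicate (n - (v.length : Int)).toNat 0])
        = acc ++ [(PySem.List.pyRange 0 n 1).map (fun i =>
            if i < (v.length : Int) then PySem.List.pyGetD v i 0 else 0)] := by
      rw [← hrow v (by simp)]; split_ifs <;> rfl
    rw [this, ih (fun w hw => hrow w (by simp [hw]))]
    simp

-- ===== VERDICT (by name: the statement is the Claim_ definition above) =====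
theorem truncate_or_pad_spec : Claim_equal_truncate_or_pad := by
  intro vs n _ hn
  unfold Spec_truncate_or_pad truncate_or_pad truncate_or_pad_alt
  rw [foldl_map_rows vs n ?_]
  · simp
  · intro v hv
    by_cases h0 : 0 ≤ n
    · exact row_eq v n h0
    · rcases hn with hn | hall
      · exact absurd hn h0
      · exact row_eq_neg v n (by omega) (hall v hv)
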